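-- pv_equiv track=rewrite | github.com/quantumlib/tesseract-decoder | src/py/astar/astar_prototype_subset_detcost.py | compute_minimal_resolution_combos
-- ===== SOURCE A (Python) =====
-- import itertools
-- from typing import Any, Dict, Iterable, List, Optional, Sequence, Tuple
--
-- def compute_minimal_resolution_combos(
--     available_pattern_masks: Iterable[int],
--     subset_size: int,
-- ) -> Dict[int, Tuple[Tuple[int, ...], ...]]:
--     """Precompute inclusion-minimal local pattern combinations for each target.
--
--     For a fixed subset S of size k, an error only matters through its nonzero local
--     pattern D(e)∩S, represented as a bit-mask in {1, ..., 2^k-1}. Because local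
--     budgets are nonnegative, an optimal local resolution never needs to use the same
--     local pattern twice, and any combo that strictly contains another combo with the
--     same XOR target is dominated.
--     """
--
--     patterns = tuple(sorted(set(available_pattern_masks)))
--     combos_by_target: Dict[int, List[Tuple[int, ...]]] = {
--         target: [] for target in range(1, 1 << subset_size)
--     }
--     for r in range(1, min(len(patterns), subset_size) + 1):
--         for combo in itertools.combinations(patterns, r):
--             target_mask = 0
--             for pattern_mask in combo:
--                 target_mask ^= pattern_mask
--             if target_mask == 0:
--                 continue
--             combo_set = set(combo)
--             existing = combos_by_target[target_mask]
--             keep = True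
--             survivors: List[Tuple[int, ...]] = []
--             for old_combo in existing:
--                 old_set = set(old_combo)
--                 if combo_set.issuperset(old_set):
--                     keep = False
--                     survivors.append(old_combo)
--                 elif old_set.issuperset(combo_set):
--                     continue
--                 else:
--                     survivors.append(old_combo)
--             if keep:
--                 survivors.append(combo)
--                 survivors.sort(key=lambda x: (len(x), x))
--                 combos_by_target[target_mask] = survivors
--     return {
--         target_mask: tuple(combos)
--         for target_mask, combos in combos_by_target.items()
--         if combos
--     }
-- ===== SOURCE B (Python) =====
-- import itertools
--
--
-- def compute_minimal_resolution_combos(available_pattern_masks, subset_size):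
--     """Two-phase rewrite: collect every nonzero-XOR combo per target first,
--     then keep the inclusion-minimal antichain of each bucket and sort once."""
--     patterns = tuple(sorted(set(available_pattern_masks)))
--     combos_by_target = {target: [] for target in range(1, 1 << subset_size)}
--     # Phase 1: bucket every combo by its XOR target (direct indexing keeps
--     # the KeyError behaviour for masks outside the subset range).
--     for r in range(1, min(len(patterns), subset_size) + 1):
--         for combo in itertools.combinations(patterns, r):
--             target_mask = 0
--             for pattern_mask in combo:
--                 target_mask ^= pattern_mask
--             if target_mask != 0:
--                 combos_by_target[target_mask].append(combo)
--     # Phase 2: per target, keep combos with no proper subset in the bucket.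
--     result = {}
--     for target_mask, bucket in combos_by_target.items():
--         minimal = [c for c in bucket
--                    if not any(o != c and set(c).issuperset(o) for o in bucket)]
--         if minimal:
--             minimal.sort(key=lambda x: (len(x), x))
--             result[target_mask] = tuple(minimal)
--     return result
-- ===== Notes on version B (the rewrite author's own statement) =====
-- stated objective: alternative
-- what changed: A maintains each target's inclusion-minimal antichain incrementally, pruning and re-sorting the bucket at every accepted combo; B is a two-phase decomposition that first buckets every nonzero-XOR combo by target and then applies a single inclusion-minimality filter and one sort per bucket.
import Mathlib
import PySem

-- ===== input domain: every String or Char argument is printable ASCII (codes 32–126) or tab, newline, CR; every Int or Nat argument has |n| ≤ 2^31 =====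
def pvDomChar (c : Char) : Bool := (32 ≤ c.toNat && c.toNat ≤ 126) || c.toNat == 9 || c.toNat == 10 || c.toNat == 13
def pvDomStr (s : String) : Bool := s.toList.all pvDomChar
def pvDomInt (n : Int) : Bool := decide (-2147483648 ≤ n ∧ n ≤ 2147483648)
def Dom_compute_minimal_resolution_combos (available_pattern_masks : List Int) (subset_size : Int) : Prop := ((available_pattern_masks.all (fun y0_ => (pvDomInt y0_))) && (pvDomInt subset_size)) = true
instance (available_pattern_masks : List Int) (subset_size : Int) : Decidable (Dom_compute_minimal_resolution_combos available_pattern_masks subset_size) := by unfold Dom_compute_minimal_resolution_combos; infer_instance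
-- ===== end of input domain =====

-- B replaces A's incremental antichain maintenance (prune-and-resort at every insertion)
-- by a two-phase decomposition: collect all combos per target, then one minimality filter
-- and one sort per bucket (objective: alternative, same asymptotic cost).

-- ===== PORT A =====
-- target_mask = XOR-fold of a combo  (shared helper: both Pythons contain this literal loop)
def pvTarg (combo : List Int) : Int := combo.foldl (fun t p => PySem.Int.bxor t p) 0

-- the inner 'for old_combo in existing' loop of A, returning (keep, survivors)
def pvKeepSurv (comboSet : PySem.Set Int) (existing : List (List Int)) : Bool × List (List Int) :=
  existing.foldl (fun st old =>
    let oldSet : PySem.Set Int := PySem.Set.ofList old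
    if PySem.Set.issuperset comboSet oldSet then (false, st.2 ++ [old])
    else if PySem.Set.issuperset oldSet comboSet then st
    else (st.1, st.2 ++ [old])) (true, [])

-- the body of A's 'for combo in itertools.combinations(patterns, r)' loop
def pvAStep (d : PySem.Dict Int (List (List Int))) (combo : List Int) : PySem.Dict Int (List (List Int)) :=
  let target_mask := pvTarg combo
  if target_mask == 0 then d
  else
    let comboSet : PySem.Set Int := PySem.Set.ofList combo
    let existing := (d.get? target_mask).getD []   -- KeyError on a missing target is excluded by Pre_
    let ks := pvKeepSurv comboSet existing
    if ks.1 then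
      d.insert target_mask
        (PySem.List.sorted2 (ks.2 ++ [combo]) (fun x => (x.length : Int)) (fun x => x))
    else d

def compute_minimal_resolution_combos (available_pattern_masks : List Int) (subset_size : Int) : List (Int × List (List Int)) :=
  let patterns := PySem.List.sorted (PySem.Set.ofList available_pattern_masks) (fun x => x)
  -- {target: [] for target in range(1, 1 << subset_size)} ; '1 <<< toNat' is exact for subset_size ≥ 0 (Pre_)
  let combos_by_target : PySem.Dict Int (List (List Int)) :=
    (PySem.List.pyRange 1 ((1 : Int) <<< subset_size.toNat) 1).foldl
      (fun d t => d.insert t []) PySem.Dict.empty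
  let final :=
    (PySem.List.pyRange 1 (min (patterns.length : Int) subset_size + 1) 1).foldl
      (fun d r => (PySem.List.combinations patterns r.toNat).foldl pvAStep d) combos_by_target
  -- {t: tuple(combos) for t, combos in ….items() if combos}
  final.items.filter (fun p => !(p.2 == []))

-- ===== PORT B =====
-- phase-1 body: combos_by_target[target_mask].append(combo) for nonzero targets
def pvBStep (d : PySem.Dict Int (List (List Int))) (combo : List Int) : PySem.Dict Int (List (List Int)) :=
  let target_mask := pvTarg combo
  if target_mask != 0 then
    d.insert target_mask ((d.get? target_mask).getD [] ++ [combo])   -- KeyError excluded by Pre_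
  else d

-- phase-2 comprehension: combos with no other bucket member as a (proper) subset
def pvMinimal (bucket : List (List Int)) : List (List Int) :=
  bucket.filter (fun c =>
    !(bucket.any (fun o => decide (o ≠ c) && PySem.Set.issuperset (PySem.Set.ofList c) o)))

def compute_minimal_resolution_combos_alt (available_pattern_masks : List Int) (subset_size : Int) : List (Int × List (List Int)) :=
  let patterns := PySem.List.sorted (PySem.Set.ofList available_pattern_masks) (fun x => x)
  let combos_by_target : PySem.Dict Int (List (List Int)) :=
    (PySem.List.pyRange 1 ((1 : Int) <<< subset_size.toNat) 1).foldl
      (fun d t => d.insert t []) PySem.Dict.empty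
  let filled :=
    (PySem.List.pyRange 1 (min (patterns.length : Int) subset_size + 1) 1).foldl
      (fun d r => (PySem.List.combinations patterns r.toNat).foldl pvBStep d) combos_by_target
  -- result dict built by assigning fresh keys in iteration order = association-list append
  filled.items.foldl (fun acc p =>
    let minimal := pvMinimal p.2
    if minimal == [] then acc
    else acc ++ [(p.1, PySem.List.sorted2 minimal (fun x => (x.length : Int)) (fun x => x))]) []

-- ===== PRECONDITION & SPEC =====
-- Pre_ excludes exactly the inputs where the Python raises: a negative subset_size
-- (ValueError from '1 << subset_size') and, for subset_size ≥ 1, any mask outside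
-- [0, 2^subset_size) (KeyError: its singleton combo's XOR target is not a dict key).
def Pre_compute_minimal_resolution_combos (available_pattern_masks : List Int) (subset_size : Int) : Prop :=
  0 ≤ subset_size ∧
    (subset_size = 0 ∨ ∀ m ∈ available_pattern_masks, 0 ≤ m ∧ m < (2 : Int) ^ subset_size.toNat)
instance (available_pattern_masks : List Int) (subset_size : Int) : Decidable (Pre_compute_minimal_resolution_combos available_pattern_masks subset_size) := by unfold Pre_compute_minimal_resolution_combos; infer_instance

def pvWitness_compute_minimal_resolution_combos : List Int × Int := ([1, 2, 3, 3], 2)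

def Spec_compute_minimal_resolution_combos (available_pattern_masks : List Int) (subset_size : Int) (out : List (Int × List (List Int))) : Prop := out = compute_minimal_resolution_combos_alt available_pattern_masks subset_size
instance (available_pattern_masks : List Int) (subset_size : Int) (out : List (Int × List (List Int))) : Decidable (Spec_compute_minimal_resolution_combos available_pattern_masks subset_size out) := by unfold Spec_compute_minimal_resolution_combos; infer_instance

-- ===== CLAIM (what is proved, stated in full; the proofs are below) =====
def Claim_equal_compute_minimal_resolution_combos : Prop := ∀ (available_pattern_masks : List Int) (subset_size : Int), Dom_compute_minimal_resolution_combos available_pattern_masks subset_size → Pre_compute_minimal_resolution_combos available_pattern_masks subset_size → Spec_compute_minimal_resolution_combos available_pattern_masks subset_size (compute_minimal_resolution_combos available_pattern_masks subset_size)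

-- ===== LEMMAS AND PROOFS =====

-- key for Python's sort key (len(x), x), as a single lexicographic key
def pvKey (x : List Int) : Lex (Int × List Int) := toLex ((x.length : Int), x)

theorem pvKey_inj : Function.Injective pvKey := by
  intro a b h
  have h2 := congrArg (fun p => (ofLex p).2) h
  simpa [pvKey] using h2

-- sorted2 with key (len, x) is sorted with the lexicographic key pvKey
theorem pvSorted2_eq (xs : List (List Int)) :
    PySem.List.sorted2 xs (fun x => (x.length : Int)) (fun x => x)
      = PySem.List.sorted xs pvKey := by
  have hbefore : (fun a b : List Int =>
        decide ((a.length : Int) < (b.length : Int)) ||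
          (!decide ((b.length : Int) < (a.length : Int)) && decide (a < b)))
      = fun a b : List Int => decide (pvKey a < pvKey b) := by
    funext a b
    simp only [pvKey, Prod.Lex.lt_iff, ofLex_toLex]
    rcases lt_trichotomy ((a.length : Int)) ((b.length : Int)) with h | h | h
    · simp [h, not_lt.mpr h.le]
    · simp [h]
    · simp [h, not_lt.mpr h.le, h.ne']
  simp only [PySem.List.sorted2, PySem.List.sorted, if_neg (by decide : ¬ (false = true))]
  rw [hbefore]

-- ----- subset machinery on strictly increasing lists -----
abbrev pvSub (o c : List Int) : Prop := ∀ x ∈ o, x ∈ c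

theorem pvSublen {a b : List Int} (ha : a.Pairwise (· < ·)) (hb : b.Pairwise (· < ·))
    (hsub : pvSub a b) (hne : a ≠ b) : a.length < b.length := by
  haveI : Std.Irrefl (fun a b : Int => a < b) := ⟨lt_irrefl⟩
  have hna : a.Nodup := ha.nodup
  have hsp : a.Subperm b := List.subperm_of_subset hna (fun x hx => hsub x hx)
  rcases lt_or_ge a.length b.length with h | h
  · exact h
  · exact absurd
      ((hsp.perm_of_length_le h).eq_of_pairwise
        (fun x y _ _ hxy hyx => absurd hxy (not_lt.mpr hyx.le)) ha hb) hne

-- ----- characterizations of the ports' inner loops -----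
theorem pvSup_eq (c o : List Int) :
    PySem.Set.issuperset (PySem.Set.ofList c) o = decide (pvSub o c) := by
  rw [Bool.eq_iff_iff]
  simp [PySem.Set.issuperset_iff, PySem.Set.mem_ofList, pvSub]

theorem pvSup_eq' (c o : List Int) :
    PySem.Set.issuperset (PySem.Set.ofList c) (PySem.Set.ofList o) = decide (pvSub o c) := by
  rw [Bool.eq_iff_iff]
  simp [PySem.Set.issuperset_iff, PySem.Set.mem_ofList, pvSub]

theorem pvKeepSurv_eq (c : List Int) (ex : List (List Int)) :
    pvKeepSurv (PySem.Set.ofList c) ex =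
      (!(ex.any (fun old => decide (pvSub old c))),
       ex.filter (fun old => decide (pvSub old c) || !(decide (pvSub c old)))) := by
  suffices H : ∀ (ex : List (List Int)) (k0 : Bool) (acc : List (List Int)),
      ex.foldl (fun st old =>
        let oldSet : PySem.Set Int := PySem.Set.ofList old
        if PySem.Set.issuperset (PySem.Set.ofList c) oldSet then (false, st.2 ++ [old])
        else if PySem.Set.issuperset oldSet (PySem.Set.ofList c) then st
        else (st.1, st.2 ++ [old])) (k0, acc)
      = (k0 && !(ex.any (fun old => decide (pvSub old c))),
         acc ++ ex.filter (fun old => decide (pvSub old c) || !(decide (pvSub c old)))) by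
    simpa [pvKeepSurv] using H ex true []
  intro ex
  induction ex with
  | nil => intro k0 acc; simp
  | cons old ex ih =>
    intro k0 acc
    rw [List.foldl_cons]
    have e1 := pvSup_eq' c old
    have e2 := pvSup_eq' old c
    show (ex.foldl _ (if PySem.Set.issuperset (PySem.Set.ofList c) (PySem.Set.ofList old) = true then _ else _)) = _
    rw [e1, e2]
    by_cases h1 : pvSub old c
    · rw [if_pos (by simpa using h1), ih]
      have hd1 : decide (pvSub old c) = true := decide_eq_true h1
      rw [List.any_cons, List.filter_cons, hd1]
      simp
    · have hd1 : decide (pvSub old c) = false := decide_eq_false h1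
      rw [if_neg (by simpa using h1)]
      by_cases h2 : pvSub c old
      · have hd2 : decide (pvSub c old) = true := decide_eq_true h2
        rw [if_pos (by simpa using h2), ih, List.any_cons, List.filter_cons, hd1, hd2]
        simp
      · have hd2 : decide (pvSub c old) = false := decide_eq_false h2
        rw [if_neg (by simpa using h2), ih, List.any_cons, List.filter_cons, hd1, hd2]
        simp

def pvMin (M : List (List Int)) : List (List Int) :=
  M.filter (fun c => !(M.any (fun o => decide (o ≠ c) && decide (pvSub o c))))

theorem pvMinimal_eq (M : List (List Int)) : pvMinimal M = pvMin M := by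
  simp only [pvMinimal, pvMin, pvSup_eq]

-- ----- the per-combo dict updates, in update-function form -----
def pvUpdA (b : List (List Int)) (c : List Int) : Option (List (List Int)) :=
  let ks := pvKeepSurv (PySem.Set.ofList c) b
  if ks.1 then
    some (PySem.List.sorted2 (ks.2 ++ [c]) (fun x => (x.length : Int)) (fun x => x))
  else none

def pvUpdB (b : List (List Int)) (c : List Int) : Option (List (List Int)) := some (b ++ [c])

def pvStep (upd : List (List Int) → List Int → Option (List (List Int)))
    (d : PySem.Dict Int (List (List Int))) (c : List Int) : PySem.Dict Int (List (List Int)) :=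
  if pvTarg c = 0 then d
  else
    match upd ((d.get? (pvTarg c)).getD []) c with
    | some b' => d.insert (pvTarg c) b'
    | none => d

theorem pvAStep_eq : pvAStep = pvStep pvUpdA := by
  funext d c
  simp only [pvAStep, pvStep, pvUpdA, beq_iff_eq]
  by_cases h : pvTarg c = 0
  · simp [h]
  · simp only [h, if_false]
    cases hks : (pvKeepSurv (PySem.Set.ofList c) ((d.get? (pvTarg c)).getD [])).1 <;>
      simp

theorem pvBStep_eq : pvBStep = pvStep pvUpdB := by
  funext d c
  simp only [pvBStep, pvStep, pvUpdB, bne_iff_ne, ne_eq]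
  by_cases h : pvTarg c = 0 <;> simp [h]

-- ----- generic dict-fold lemma: items of the fold, bucket by bucket -----
theorem pvInitItems (K : List Int) (hK : K.Nodup) :
    ((K.foldl (fun d t => d.insert t ([] : List (List Int))) PySem.Dict.empty).items)
      = K.map (fun t => (t, ([] : List (List Int)))) := by
  suffices H : ∀ (K : List Int), K.Nodup →
      ∀ (d : PySem.Dict Int (List (List Int))), (∀ t ∈ K, d.contains t = false) →
      (K.foldl (fun d t => d.insert t ([] : List (List Int))) d).items
        = d.items ++ K.map (fun t => (t, ([] : List (List Int)))) by
    simpa using H K hK PySem.Dict.empty (by simp)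
  intro K
  induction K with
  | nil => intro _ d _; simp
  | cons t K ih =>
    intro hnd d hc
    rw [List.foldl_cons]
    have hins := PySem.Dict.items_insert_of_not_contains d ([] : List (List Int)) (hc t (.head _))
    rw [ih (List.nodup_cons.mp hnd).2 (d.insert t []) ?_, hins]
    · simp
    · intro t' ht'
      have hne : (t' == t) = false := by
        simp only [beq_eq_false_iff_ne, ne_eq]
        rintro rfl
        exact (List.nodup_cons.mp hnd).1 ht'
      rw [PySem.Dict.contains_insert, hne, Bool.false_or]
      exact hc t' (.tail _ ht')

theorem pvFoldDict (upd : List (List Int) → List Int → Option (List (List Int)))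
    (K : List Int) (hK : K.Nodup) (h0 : (0 : Int) ∉ K) :
    ∀ (L : List (List Int)), (∀ c ∈ L, pvTarg c ≠ 0 → pvTarg c ∈ K) →
    ∀ (g : Int → List (List Int)) (d : PySem.Dict Int (List (List Int))),
      d.items = K.map (fun t => (t, g t)) →
      (L.foldl (pvStep upd) d).items
        = K.map (fun t => (t,
            (L.filter (fun c => pvTarg c == t)).foldl (fun b c => (upd b c).getD b) (g t))) := by
  intro L
  induction L with
  | nil => intro _ g d hd; simpa using hd
  | cons c L ih =>
    intro hL g d hd
    have hkeys : d.keys = K := by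
      simp only [PySem.Dict.keys, hd, List.map_map]
      simp [Function.comp_def]
    by_cases h0c : pvTarg c = 0
    · rw [List.foldl_cons, show pvStep upd d c = d by simp [pvStep, h0c],
        ih (fun x hx => hL x (.tail _ hx)) g d hd]
      apply List.map_congr_left
      intro t ht
      have hne : (pvTarg c == t) = false := by
        simp only [beq_eq_false_iff_ne, ne_eq, h0c]
        rintro rfl
        exact h0 ht
      rw [List.filter_cons, hne]
      simp
    · have htK : pvTarg c ∈ K := hL c (.head _) h0c
      have hget : d.get? (pvTarg c) = some (g (pvTarg c)) := by
        apply PySem.Dict.get?_of_mem_items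
        · rw [hd]
          exact List.mem_map_of_mem htK
        · rw [hkeys]; exact hK
      cases hupd : upd (g (pvTarg c)) c with
      | none =>
        rw [List.foldl_cons, show pvStep upd d c = d by simp [pvStep, h0c, hget, hupd],
          ih (fun x hx => hL x (.tail _ hx)) g d hd]
        apply List.map_congr_left
        intro t ht
        rw [List.filter_cons]
        by_cases hteq : pvTarg c = t
        · subst hteq
          simp [hupd]
        · simp [hteq]
      | some b' =>
        have hcont : d.contains (pvTarg c) = true := by
          rw [PySem.Dict.contains_iff_mem_keys, hkeys]; exact htK
        have hitems : (d.insert (pvTarg c) b').items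
            = K.map (fun t => (t, if t = pvTarg c then b' else g t)) := by
          rw [PySem.Dict.items_insert_of_contains d b' hcont, hd, List.map_map]
          apply List.map_congr_left
          intro t _
          by_cases hteq : t = pvTarg c <;> simp [hteq]
        rw [List.foldl_cons, show pvStep upd d c = d.insert (pvTarg c) b' by
            simp [pvStep, h0c, hget, hupd],
          ih (fun x hx => hL x (.tail _ hx)) (fun t => if t = pvTarg c then b' else g t) _ hitems]
        apply List.map_congr_left
        intro t ht
        rw [List.filter_cons]
        by_cases hteq : pvTarg c = t
        · subst hteq
          simp [hupd]
        · simp [hteq, Ne.symm hteq]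

-- ----- the heart: A's incremental antichain fold equals sort-of-minimal -----
theorem pvExistsMin (M : List (List Int)) (h1 : ∀ x ∈ M, x.Pairwise (· < ·)) :
    ∀ (c o : List Int), o ∈ M → pvSub o c → ∃ o' ∈ pvMin M, pvSub o' c := by
  intro c
  suffices H : ∀ (n : Nat) (o : List Int), o.length = n → o ∈ M → pvSub o c →
      ∃ o' ∈ pvMin M, pvSub o' c from fun o => H o.length o rfl
  intro n
  induction n using Nat.strong_induction_on with
  | _ n ih =>
    intro o hlen hoM hsub
    by_cases hmin : o ∈ pvMin M
    · exact ⟨o, hmin, hsub⟩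
    · have hany : M.any (fun o2 => decide (o2 ≠ o) && decide (pvSub o2 o)) = true := by
        by_contra hfalse
        rw [Bool.not_eq_true] at hfalse
        refine hmin (List.mem_filter.mpr ⟨hoM, ?_⟩)
        show (!(M.any (fun o2 => decide (o2 ≠ o) && decide (pvSub o2 o)))) = true
        rw [hfalse]
        rfl
      obtain ⟨o2, ho2M, hprop⟩ := List.any_eq_true.mp hany
      rw [Bool.and_eq_true, decide_eq_true_eq, decide_eq_true_eq] at hprop
      have hne : o2 ≠ o := hprop.1
      have hs2 : pvSub o2 o := hprop.2
      have hlt : o2.length < n :=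
        hlen ▸ pvSublen (h1 o2 ho2M) (h1 o hoM) hs2 hne
      exact ih o2.length hlt o2 rfl ho2M (fun x hx => hsub x (hs2 x hx))

theorem pvMin_append (M : List (List Int)) (c : List Int)
    (h1 : ∀ x ∈ M, x.Pairwise (· < ·)) (hc : c.Pairwise (· < ·)) (hcM : c ∉ M)
    (hlen : ∀ o ∈ M, o.length ≤ c.length) :
    pvMin (M ++ [c]) =
      pvMin M ++ (if M.any (fun o => decide (pvSub o c)) then [] else [c]) := by
  unfold pvMin
  rw [List.filter_append]
  congr 1
  · apply List.filter_congr
    intro o hoM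
    rw [List.any_append]
    have hc1 : [c].any (fun o2 => decide (o2 ≠ o) && decide (pvSub o2 o)) = false := by
      simp only [List.any_cons, List.any_nil, Bool.or_false, Bool.and_eq_false_iff]
      by_cases hsub : pvSub c o
      · left
        have hco : c = o := by
          by_contra hne
          have := pvSublen hc (h1 o hoM) hsub hne
          exact absurd (hlen o hoM) (by omega)
        simp [hco]
      · right; simpa using hsub
    rw [hc1, Bool.or_false]
  · simp only [List.filter_cons, List.filter_nil]
    have hpred : (M ++ [c]).any (fun o => decide (o ≠ c) && decide (pvSub o c))
        = M.any (fun o => decide (pvSub o c)) := by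
      rw [List.any_append]
      have h2 : [c].any (fun o => decide (o ≠ c) && decide (pvSub o c)) = false := by simp
      rw [h2, Bool.or_false]
      apply PySem.List.any_congr_mem
      intro o hoM
      have hne : o ≠ c := fun h => hcM (h ▸ hoM)
      simp [hne]
    rw [hpred]
    cases h : M.any (fun o => decide (pvSub o c)) <;> simp

theorem pvBucket (M : List (List Int)) (h1 : ∀ x ∈ M, x.Pairwise (· < ·))
    (h2 : M.Nodup) (h3 : M.Pairwise (fun a b => a.length ≤ b.length)) :
    M.foldl (fun b c => (pvUpdA b c).getD b) []
      = PySem.List.sorted2 (pvMin M) (fun x => (x.length : Int)) (fun x => x) := by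
  induction M using List.reverseRecOn with
  | nil => rfl
  | append_singleton M' c ih =>
    have h1' : ∀ x ∈ M', x.Pairwise (· < ·) := fun x hx => h1 x (List.mem_append_left _ hx)
    have hc : c.Pairwise (· < ·) := h1 c (List.mem_append_right _ (List.mem_singleton.mpr rfl))
    obtain ⟨h2', -, hdisj⟩ := List.nodup_append.mp h2
    have hcM : c ∉ M' := fun h => hdisj c h c (List.mem_singleton.mpr rfl) rfl
    obtain ⟨h3', -, hcross⟩ := List.pairwise_append.mp h3
    have hlen : ∀ o ∈ M', o.length ≤ c.length := fun o ho =>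
      hcross o ho c (List.mem_singleton.mpr rfl)
    have ihv := ih h1' h2' h3'
    rw [List.foldl_append, ihv, List.foldl_cons, List.foldl_nil]
    have hmemS : ∀ old, old ∈ PySem.List.sorted2 (pvMin M') (fun x => (x.length : Int)) (fun x => x) → old ∈ M' := by
      intro old hold
      have := (PySem.List.sorted2_perm (pvMin M') (fun x : List Int => (x.length : Int)) (fun x => x) false).mem_iff.mp hold
      exact List.mem_of_mem_filter this
    unfold pvUpdA
    rw [pvKeepSurv_eq]
    have hsurv : (PySem.List.sorted2 (pvMin M') (fun x => (x.length : Int)) (fun x => x)).filter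
        (fun old => decide (pvSub old c) || !(decide (pvSub c old)))
        = PySem.List.sorted2 (pvMin M') (fun x => (x.length : Int)) (fun x => x) := by
      apply List.filter_eq_self.mpr
      intro old hold
      have holdM : old ∈ M' := hmemS old hold
      by_cases hco : pvSub c old
      · have hne : c ≠ old := fun h => hcM (h ▸ holdM)
        have := pvSublen hc (h1' old holdM) hco hne
        exact absurd (hlen old holdM) (by omega)
      · simp [hco]
    have hanyEq : (PySem.List.sorted2 (pvMin M') (fun x => (x.length : Int)) (fun x => x)).any
        (fun old => decide (pvSub old c)) = M'.any (fun o => decide (pvSub o c)) := by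
      rw [Bool.eq_iff_iff]
      simp only [List.any_eq_true, decide_eq_true_eq]
      constructor
      · rintro ⟨o, ho, hs⟩
        exact ⟨o, hmemS o ho, hs⟩
      · rintro ⟨o, ho, hs⟩
        obtain ⟨o', ho', hs'⟩ := pvExistsMin M' h1' c o ho hs
        refine ⟨o', ?_, hs'⟩
        exact (PySem.List.sorted2_perm (pvMin M') (fun x : List Int => (x.length : Int)) (fun x => x) false).mem_iff.mpr ho'
    rw [pvMin_append M' c h1' hc hcM hlen]
    cases hany : M'.any (fun o => decide (pvSub o c)) with
    | true =>
      simp only [if_true, List.append_nil]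
      rw [hanyEq, hany]
      simp
    | false =>
      rw [hanyEq, hany]
      simp only [Bool.not_false, if_true, Option.getD_some, hsurv,
        if_neg (by decide : ¬(false = true))]
      rw [pvSorted2_eq, pvSorted2_eq, pvSorted2_eq]
      exact PySem.List.sorted_eq_sorted_of_perm _ _ pvKey pvKey_inj
        ((PySem.List.sorted_perm (pvMin M') pvKey false).append_right [c])

-- ----- enumeration properties -----
theorem pvFoldFlat {α β : Type} (S : β → α → β) (f : Int → List α) :
    ∀ (rs : List Int) (d : β),
      rs.foldl (fun d r => (f r).foldl S d) d = (rs.flatMap f).foldl S d := by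
  intro rs
  induction rs with
  | nil => intro d; rfl
  | cons r rs ih => intro d; simp [List.flatMap_cons, List.foldl_append, ih]

theorem pvCombNodup {α : Type} [DecidableEq α] :
    ∀ (xs : List α) (r : Nat), xs.Nodup → (PySem.List.combinations xs r).Nodup := by
  intro xs
  induction xs with
  | nil =>
    intro r _
    cases r <;> simp [PySem.List.combinations_zero, PySem.List.combinations_nil_succ]
  | cons x xs ih =>
    intro r hnd
    cases r with
    | zero => simp [PySem.List.combinations_zero]
    | succ r =>
      rw [PySem.List.combinations_cons_succ]
      obtain ⟨hx, hxs⟩ := List.nodup_cons.mp hnd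
      refine List.Nodup.append ((ih r hxs).map ?_) (ih (r + 1) hxs) ?_
      · intro a b h
        simpa using h
      · intro a ha hb
        obtain ⟨a', _, rfl⟩ := List.mem_map.mp ha
        have hsub := (PySem.List.mem_combinations_iff xs (r + 1) _).mp hb |>.1
        exact hx (hsub.subset (List.mem_cons_self))

theorem pvEnum (P : List Int) (hP : P.Pairwise (· < ·)) :
    ∀ (rs : List Int), rs.Pairwise (· < ·) → (∀ r ∈ rs, 1 ≤ r) →
      (∀ c ∈ rs.flatMap (fun r => PySem.List.combinations P r.toNat),
          c.Sublist P ∧ 1 ≤ c.length) ∧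
      (rs.flatMap (fun r => PySem.List.combinations P r.toNat)).Nodup ∧
      (rs.flatMap (fun r => PySem.List.combinations P r.toNat)).Pairwise
        (fun a b => a.length ≤ b.length) := by
  haveI : Std.Irrefl (fun a b : Int => a < b) := ⟨lt_irrefl⟩
  have hPnd : P.Nodup := hP.nodup
  intro rs
  induction rs with
  | nil => intro _ _; simp
  | cons r rs ih =>
    intro hpw h1r
    obtain ⟨hr_lt, hpw'⟩ := List.pairwise_cons.mp hpw
    have hr1 : 1 ≤ r := h1r r (.head _)
    obtain ⟨ihmem, ihnd, ihpw⟩ := ih hpw' (fun x hx => h1r x (.tail _ hx))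
    have hlen1 : ∀ c ∈ PySem.List.combinations P r.toNat, c.length = r.toNat := fun c hc =>
      ((PySem.List.mem_combinations_iff P r.toNat c).mp hc).2
    have hrest : ∀ b ∈ rs.flatMap (fun r' => PySem.List.combinations P r'.toNat),
        ∃ r' ∈ rs, b.length = r'.toNat := by
      intro b hb
      obtain ⟨r', hr', hb'⟩ := List.mem_flatMap.mp hb
      exact ⟨r', hr', ((PySem.List.mem_combinations_iff P r'.toNat b).mp hb').2⟩
    rw [List.flatMap_cons]
    refine ⟨?_, ?_, ?_⟩
    · intro c hc
      rcases List.mem_append.mp hc with h | h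
      · obtain ⟨hsub, hlen⟩ := (PySem.List.mem_combinations_iff P r.toNat c).mp h
        refine ⟨hsub, ?_⟩
        rw [hlen]
        omega
      · exact ihmem c h
    · refine List.Nodup.append (pvCombNodup P r.toNat hPnd) ihnd ?_
      intro a ha hb
      obtain ⟨r', hr', hlen'⟩ := hrest a hb
      have := hlen1 a ha
      have := hr_lt r' hr'
      omega
    · rw [List.pairwise_append]
      refine ⟨List.pairwise_iff_forall_sublist.mpr ?_, ihpw, ?_⟩
      · intro a b hab
        have hmem := hab.subset
        have ha := hlen1 a (hmem (List.mem_cons_self))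
        have hb := hlen1 b (hmem (List.mem_cons_of_mem a (List.mem_cons_self)))
        omega
      · intro a ha b hb
        obtain ⟨r', hr', hlen'⟩ := hrest b hb
        have := hlen1 a ha
        have := hr_lt r' hr'
        omega

theorem pvTargBound (kn : Nat) :
    ∀ (c : List Int), (∀ m ∈ c, 0 ≤ m ∧ m < (2 : Int) ^ kn) →
      0 ≤ pvTarg c ∧ pvTarg c < (2 : Int) ^ kn := by
  have hstep : ∀ (c : List Int), (∀ m ∈ c, 0 ≤ m ∧ m < (2 : Int) ^ kn) →
      ∀ (t0 : Int), 0 ≤ t0 → t0 < (2 : Int) ^ kn →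
      0 ≤ c.foldl (fun t p => PySem.Int.bxor t p) t0 ∧
        c.foldl (fun t p => PySem.Int.bxor t p) t0 < (2 : Int) ^ kn := by
    intro c
    induction c with
    | nil => intro _ t0 h1 h2; exact ⟨h1, h2⟩
    | cons m c ih =>
      intro hm t0 h1 h2
      rw [List.foldl_cons]
      have hm0 := hm m (.head _)
      have hx : PySem.Int.bxor t0 m = ((t0.toNat ^^^ m.toNat : Nat) : Int) :=
        PySem.Int.bxor_of_nonneg h1 hm0.1
      have hpow : ((2 : Int) ^ kn) = ((2 ^ kn : Nat) : Int) := by push_cast; ring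
      have hlt : (t0.toNat ^^^ m.toNat) < 2 ^ kn := by
        apply Nat.xor_lt_two_pow
        · omega
        · omega
      exact ih (fun y hy => hm y (.tail _ hy)) _ (by rw [hx]; positivity)
        (by rw [hx]; omega)
  intro c hc
  have h2 : (0 : Int) < (2 : Int) ^ kn := by positivity
  exact hstep c hc 0 le_rfl h2

-- ----- final assembly helper: filter-of-A-items equals B's result loop -----
theorem pvFinal (f g : Int → List (List Int)) :
    ∀ (K : List Int), (∀ t ∈ K,
        f t = PySem.List.sorted2 (pvMinimal (g t)) (fun x => (x.length : Int)) (fun x => x)) →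
    ∀ (acc : List (Int × List (List Int))),
      acc ++ (K.map (fun t => (t, f t))).filter (fun p => !(p.2 == []))
        = (K.map (fun t => (t, g t))).foldl (fun acc p =>
            let minimal := pvMinimal p.2
            if minimal == [] then acc
            else acc ++ [(p.1, PySem.List.sorted2 minimal (fun x => (x.length : Int)) (fun x => x))]) acc := by
  intro K
  induction K with
  | nil => intro _ acc; simp
  | cons t K ih =>
    intro hf acc
    have hft := hf t (.head _)
    have htl := fun x hx => hf x (List.mem_cons_of_mem t hx)
    rw [List.map_cons, List.map_cons, List.filter_cons, List.foldl_cons]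
    by_cases hmin : pvMinimal (g t) = []
    · have hfnil : f t = [] := by rw [hft, hmin]; rfl
      have hcond : (!(((t, f t) : Int × List (List Int)).2 == [])) = false := by
        simp [hfnil]
      rw [hcond]
      show acc ++ List.filter _ (K.map fun t => (t, f t)) = _
      have hbody : (let minimal := pvMinimal ((t, g t) : Int × List (List Int)).2
          if minimal == [] then acc
          else acc ++ [((t, g t).1, PySem.List.sorted2 minimal (fun x => (x.length : Int)) (fun x => x))]) = acc := by
        simp [hmin]
      rw [hbody]
      exact ih htl acc
    · have hfne : f t ≠ [] := by
        rw [hft]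
        intro h
        exact hmin (List.Perm.eq_nil ((PySem.List.sorted2_perm (pvMinimal (g t)) (fun x : List Int => (x.length : Int)) (fun x => x) false).symm.trans (h ▸ List.Perm.refl _)))
      have hcond : (!(((t, f t) : Int × List (List Int)).2 == [])) = true := by
        simpa using hfne
      rw [hcond]
      have hbody : (let minimal := pvMinimal ((t, g t) : Int × List (List Int)).2
          if minimal == [] then acc
          else acc ++ [((t, g t).1, PySem.List.sorted2 minimal (fun x => (x.length : Int)) (fun x => x))])
          = acc ++ [(t, PySem.List.sorted2 (pvMinimal (g t)) (fun x => (x.length : Int)) (fun x => x))] := by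
        show (if (pvMinimal (g t) == []) = true then acc else _) = _
        rw [if_neg (by simpa using hmin)]
      rw [if_pos rfl, hbody, ← hft]
      show acc ++ ((t, f t) :: List.filter _ (K.map fun t => (t, f t))) = _
      rw [show acc ++ ((t, f t) :: List.filter (fun p => !(p.2 == [])) (K.map fun t => (t, f t)))
            = (acc ++ [(t, f t)]) ++ List.filter (fun p => !(p.2 == [])) (K.map fun t => (t, f t)) by
          simp]
      exact ih htl (acc ++ [(t, f t)])



-- ===== VERDICT (by name: the statement is the Claim_ definition above) =====
theorem compute_minimal_resolution_combos_spec : Claim_equal_compute_minimal_resolution_combos := by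
  unfold Claim_equal_compute_minimal_resolution_combos
  intro masks k _ hpre
  unfold Spec_compute_minimal_resolution_combos
  obtain ⟨hk0, hbnd⟩ := hpre
  unfold compute_minimal_resolution_combos compute_minimal_resolution_combos_alt
  simp only []
  set P : List Int := PySem.List.sorted (PySem.Set.ofList masks) (fun x => x) with hPdef
  set kn := k.toNat with hkn
  set K : List Int := PySem.List.pyRange 1 ((1 : Int) <<< kn) 1 with hKdef
  set rs : List Int := PySem.List.pyRange 1 (min (P.length : Int) k + 1) 1 with hrsdef
  have hP : P.Pairwise (· < ·) := PySem.List.sorted_ofList_pairwise_lt masks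
  have hKnd : K.Nodup := PySem.List.nodup_pyRange_one 1 ((1 : Int) <<< kn)
  have h0K : (0 : Int) ∉ K := by
    intro h
    have := PySem.List.mem_pyRange_one.mp h
    omega
  have hrs_pw : rs.Pairwise (· < ·) :=
    PySem.List.pairwise_lt_pyRange_one 1 (min (P.length : Int) k + 1)
  have hrs_1 : ∀ r ∈ rs, 1 ≤ r := fun r hr => (PySem.List.mem_pyRange_one.mp hr).1
  obtain ⟨hLmem, hLnd, hLpw⟩ := pvEnum P hP rs hrs_pw hrs_1
  set L := rs.flatMap (fun r => PySem.List.combinations P r.toNat) with hLdef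
  have hshift : ((1 : Int) <<< kn) = (2 : Int) ^ kn := by rw [Int.shiftLeft_eq]; ring
  have hLK : ∀ c ∈ L, pvTarg c ≠ 0 → pvTarg c ∈ K := by
    intro c hc hne
    rcases hbnd with hzero | hb
    · exfalso
      have hmin0 : min (P.length : Int) k = 0 := by
        have : (0 : Int) ≤ (P.length : Int) := Int.natCast_nonneg _
        omega
      have hrsnil : rs = [] := by
        rw [hrsdef, hmin0]
        exact PySem.List.pyRange_one_eq_nil (by norm_num)
      rw [hLdef, hrsnil] at hc
      simp at hc
    · have hcP : ∀ m ∈ c, 0 ≤ m ∧ m < (2 : Int) ^ kn := by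
        intro m hm
        have hmP : m ∈ P := (hLmem c hc).1.subset hm
        have hmm : m ∈ masks := by
          have h1 : m ∈ PySem.Set.ofList masks :=
            (PySem.List.mem_sorted (PySem.Set.ofList masks) (fun x => x) false m).mp hmP
          exact (PySem.Set.mem_ofList masks m).mp h1
        exact hb m hmm
      have := pvTargBound kn c hcP
      rw [hKdef, PySem.List.mem_pyRange_one, hshift]
      omega
  rw [pvAStep_eq, pvBStep_eq, pvFoldFlat, pvFoldFlat, ← hLdef,
    pvFoldDict pvUpdA K hKnd h0K L hLK (fun _ => []) _ (pvInitItems K hKnd),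
    pvFoldDict pvUpdB K hKnd h0K L hLK (fun _ => []) _ (pvInitItems K hKnd)]
  have hBfold : (fun t : Int =>
      ((t, (L.filter (fun c => pvTarg c == t)).foldl (fun b c => (pvUpdB b c).getD b) ([] : List (List Int))) : Int × List (List Int)))
      = fun t : Int => (t, L.filter (fun c => pvTarg c == t)) := by
    funext t
    have hfn : (fun (b : List (List Int)) (c : List Int) => (pvUpdB b c).getD b)
        = fun b c => b ++ [c] := by funext b c; rfl
    rw [hfn]
    simpa using PySem.List.foldl_append_singleton_eq_self
      (l := L.filter (fun c => pvTarg c == t)) (acc := ([] : List (List Int)))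
  rw [hBfold]
  have hmain := pvFinal
    (fun t => (L.filter (fun c => pvTarg c == t)).foldl (fun b c => (pvUpdA b c).getD b) [])
    (fun t => L.filter (fun c => pvTarg c == t)) K ?_ []
  · simpa using hmain
  · intro t _
    have hsubl : (L.filter (fun c => pvTarg c == t)).Sublist L := List.filter_sublist
    have h1 : ∀ x ∈ L.filter (fun c => pvTarg c == t), x.Pairwise (· < ·) := by
      intro x hx
      exact List.Pairwise.sublist (hLmem x (hsubl.subset hx)).1 hP
    have h2 : (L.filter (fun c => pvTarg c == t)).Nodup := hLnd.sublist hsubl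
    have h3 : (L.filter (fun c => pvTarg c == t)).Pairwise (fun a b => a.length ≤ b.length) :=
      List.Pairwise.sublist hsubl hLpw
    beta_reduce
    rw [pvBucket _ h1 h2 h3, pvMinimal_eq]
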